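-- pv_equiv track=rewrite | github.com/CharlesFee/CS115-Code | hw6.py | splitGroups
-- ===== SOURCE A (Python) =====
-- def splitGroups(s):
--     '''Splits s into comma separated groups ie 1110101110001 -> 111,0,1,0,111,000,1'''
--     if len(s)==1:
--         return s[0]
--     else:
--         if s[0]==s[1]:
--             return s[0]+splitGroups(s[1:])
--         else:
--             return s[0]+','+splitGroups(s[1:])
-- ===== SOURCE B (Python) =====
-- def splitGroups(s):
--     '''Splits s into comma separated groups: one linear pass building a list of groups, then join.'''
--     groups = []
--     for c in s:
--         if groups and groups[-1][-1] == c: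
--             groups[-1].append(c)
--         else:
--             groups.append([c])
--     return ','.join(''.join(g) for g in groups)
-- ===== Notes on version B (the rewrite author's own statement) =====
-- stated objective: faster
-- what changed: Replaces A's recursion that re-slices and re-concatenates the whole suffix at every character (quadratic) with a single linear left-to-right pass that accumulates a list of run groups and joins them once; Pre_ excludes only the empty string, on which A raises IndexError.
import Mathlib
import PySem

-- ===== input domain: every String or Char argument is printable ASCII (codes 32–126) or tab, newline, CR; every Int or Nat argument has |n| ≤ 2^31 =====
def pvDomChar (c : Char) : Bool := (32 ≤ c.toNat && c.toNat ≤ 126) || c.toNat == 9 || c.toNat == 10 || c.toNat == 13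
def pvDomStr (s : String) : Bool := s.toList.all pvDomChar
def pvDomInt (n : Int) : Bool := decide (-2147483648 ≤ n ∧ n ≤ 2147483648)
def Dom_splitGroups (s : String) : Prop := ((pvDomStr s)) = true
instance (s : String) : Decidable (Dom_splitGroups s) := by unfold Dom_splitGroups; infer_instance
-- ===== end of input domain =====

-- B replaces A's quadratic slice-and-concat recursion with one linear pass that
-- collects run groups and joins them once; equivalence of return values is proved
-- on nonempty strings (A raises IndexError on "").

-- ===== PORT A =====
-- A's recursion on the character list: len(s)==1 → s[0]; else compare s[0] with s[1]
-- and recurse on s[1:].  On "" Python raises IndexError (excluded by Pre_); the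
-- port returns [] there, a value the claim never talks about.
def splitGroupsA : List Char → List Char
  | [] => []
  | [c] => [c]
  | c :: d :: rest =>
      if c == d then c :: splitGroupsA (d :: rest)
      else c :: ',' :: splitGroupsA (d :: rest)

def splitGroups (s : String) : String := String.ofList (splitGroupsA s.toList)

-- ===== PORT B =====
-- Source B keeps `groups`, a list of run groups, mutated at its end (groups[-1]).
-- The port represents it reversed, each group reversed (so groups[-1][-1] is the
-- head of the head) — the exact same values, appended at the head.
def groupStep (groups : List (List Char)) (c : Char) : List (List Char) :=
  match groups with
  | [] => [[c]]
  | g :: gs => if g.head? == some c then (c :: g) :: gs else [c] :: g :: gs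

-- ','.join of the groups (restored to forward order)
def joinGroups (groups : List (List Char)) : List Char :=
  List.intercalate [','] (groups.reverse.map List.reverse)

def splitGroups_alt (s : String) : String :=
  String.ofList (joinGroups (s.toList.foldl groupStep []))

-- ===== PRECONDITION & SPEC =====
-- Pre_ excludes only the empty string, on which A raises IndexError.
def Pre_splitGroups (s : String) : Prop := s ≠ ""
instance (s : String) : Decidable (Pre_splitGroups s) := by unfold Pre_splitGroups; infer_instance
def pvWitness_splitGroups : String := "1110101110001"

def Spec_splitGroups (s : String) (out : String) : Prop := out = splitGroups_alt s
instance (s : String) (out : String) : Decidable (Spec_splitGroups s out) := by unfold Spec_splitGroups; infer_instance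

-- ===== CLAIM (what is proved, stated in full; the proofs are below) =====
def Claim_equal_splitGroups : Prop := ∀ (s : String), Dom_splitGroups s → Pre_splitGroups s → Spec_splitGroups s (splitGroups s)

-- ===== LEMMAS AND PROOFS =====

-- prefix contributed by the already-closed groups: their join plus a comma, if any
def closedPrefix (gs : List (List Char)) : List Char :=
  match gs with
  | [] => []
  | _ :: _ => joinGroups gs ++ [',']

theorem intercalate_cons2 (a b : List Char) (t : List (List Char)) :
    List.intercalate [','] (a :: b :: t) = a ++ [','] ++ List.intercalate [','] (b :: t) := by
  simp [List.intercalate, List.intersperse]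

theorem intercalate_concat (y : List Char) :
    ∀ xss : List (List Char), xss ≠ [] →
      List.intercalate [','] (xss ++ [y]) = List.intercalate [','] xss ++ [','] ++ y := by
  intro xss
  induction xss with
  | nil => intro h; exact absurd rfl h
  | cons z zs ih =>
      intro _
      cases zs with
      | nil => simp [List.intercalate]
      | cons w ws =>
          have h2 := ih (by simp)
          simp only [List.cons_append] at h2 ⊢
          simp only [intercalate_cons2, h2]
          simp

theorem joinGroups_cons (c : Char) (g : List Char) (gs : List (List Char)) :
    joinGroups ((c :: g) :: gs) = closedPrefix gs ++ g.reverse ++ [c] := by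
  cases gs with
  | nil => simp [joinGroups, closedPrefix, List.intercalate]
  | cons h t =>
      unfold joinGroups closedPrefix
      have hsplit : ((c :: g) :: h :: t).reverse.map List.reverse =
          ((h :: t).reverse.map List.reverse) ++ [g.reverse ++ [c]] := by simp
      rw [hsplit, intercalate_concat _ _ (by simp)]
      simp [joinGroups]

theorem foldl_inv : ∀ (l : List Char) (c : Char) (g : List Char) (gs : List (List Char)),
    joinGroups (List.foldl groupStep ((c :: g) :: gs) l) =
      closedPrefix gs ++ g.reverse ++ splitGroupsA (c :: l) := by
  intro l
  induction l with
  | nil =>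
      intro c g gs
      simp [splitGroupsA, joinGroups_cons]
  | cons d r ih =>
      intro c g gs
      by_cases h : c = d
      · subst h
        have hstep : groupStep ((c :: g) :: gs) c = (c :: c :: g) :: gs := by
          simp [groupStep]
        rw [List.foldl_cons, hstep, ih c (c :: g) gs]
        simp [splitGroupsA]
      · have hstep : groupStep ((c :: g) :: gs) d = [d] :: (c :: g) :: gs := by
          simp [groupStep, h]
        rw [List.foldl_cons, hstep, ih d [] ((c :: g) :: gs)]
        have hcp : closedPrefix ((c :: g) :: gs) = closedPrefix gs ++ g.reverse ++ [c] ++ [','] := by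
          simp [closedPrefix, joinGroups_cons]
        rw [hcp]
        simp [splitGroupsA, h]

theorem splitGroups_spec : Claim_equal_splitGroups := by
  intro s _ hpre
  unfold Spec_splitGroups splitGroups splitGroups_alt
  cases hl : s.toList with
  | nil =>
      exfalso
      exact hpre (by cases s; simp_all)
  | cons c l =>
      have hstep : groupStep [] c = [[c]] := by simp [groupStep]
      rw [List.foldl_cons, hstep, foldl_inv l c [] []]
      simp [closedPrefix]
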